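-- pv_equiv track=rewrite | github.com/MahumFatimaKhan/Automated-Streaming-Newsletter | modules/scraper_optimized.py | _filter_excluded_content
-- ===== SOURCE A (Python) =====
-- def _filter_excluded_content(items):
--     """Filter out sports and other excluded content."""
--     excluded_keywords = [
--         'Sports', 'VOD / Buy / Rent', 'YouTube', 'Fox Soccer Plus',
--         'ESPN', 'Gold Channel', 'Baseball', 'Cup', 'Football', 'Championship',
--         'WWE', 'NFL', 'Tennis', 'Formula 1', 'NBA', 'Apple TV+', 'Soccer',
--         'Boxing', 'UFC', 'MMA', 'Golf', 'Hockey', 'Cricket', 'Rugby'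
--     ]
--
--     filtered = []
--     for item in items:
--         content_text = f"{item.get('name', '')} {item.get('type', '')} {item.get('channel', '')}"
--
--         if not any(keyword.lower() in content_text.lower() for keyword in excluded_keywords):
--             filtered.append(item)
--
--     return filtered
-- ===== SOURCE B (Python) =====
-- # B: single left-to-right scan of the lowered text with a first-character bucket index,
-- # instead of one full substring search per keyword.
--
-- _EXCLUDED_LOWER = [
--     'sports', 'vod / buy / rent', 'youtube', 'fox soccer plus',
--     'espn', 'gold channel', 'baseball', 'cup', 'football', 'championship',
--     'wwe', 'nfl', 'tennis', 'formula 1', 'nba', 'apple tv+', 'soccer',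
--     'boxing', 'ufc', 'mma', 'golf', 'hockey', 'cricket', 'rugby'
-- ]
--
-- _BUCKETS = {}
-- for _kw in _EXCLUDED_LOWER:
--     _BUCKETS.setdefault(_kw[0], []).append(_kw)
--
--
-- def _has_excluded(text):
--     t = text.lower()
--     for i in range(len(t)):
--         for kw in _BUCKETS.get(t[i], ()):
--             if t.startswith(kw, i):
--                 return True
--     return False
--
--
-- def _filter_excluded_content(items):
--     return [item for item in items
--             if not _has_excluded(f"{item.get('name', '')} {item.get('type', '')} {item.get('channel', '')}")]
-- ===== Notes on version B (the rewrite author's own statement) =====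
-- stated objective: alternative
-- what changed: Replaces the per-keyword any()-substring scan over the rebuilt loop with a single left-to-right scan of the lowered text that, at each position, only tries the (pre-bucketed by first character, pre-lowercased) keywords starting with that character, and builds the result by list comprehension instead of append-in-a-loop.
import Mathlib
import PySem

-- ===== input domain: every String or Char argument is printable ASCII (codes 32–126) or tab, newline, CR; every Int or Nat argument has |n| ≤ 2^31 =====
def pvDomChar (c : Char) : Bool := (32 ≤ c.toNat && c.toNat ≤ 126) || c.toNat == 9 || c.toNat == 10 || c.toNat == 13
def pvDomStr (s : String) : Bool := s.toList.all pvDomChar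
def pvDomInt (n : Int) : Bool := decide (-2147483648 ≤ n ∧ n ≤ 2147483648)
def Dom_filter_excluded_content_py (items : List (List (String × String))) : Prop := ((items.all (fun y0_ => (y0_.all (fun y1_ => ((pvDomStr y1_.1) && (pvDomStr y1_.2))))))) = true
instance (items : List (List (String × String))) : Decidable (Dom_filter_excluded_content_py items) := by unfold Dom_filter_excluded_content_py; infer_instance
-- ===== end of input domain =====

-- B changes the matching strategy: one left-to-right scan of the lowered text with a
-- first-character bucket index over pre-lowercased keywords, and a comprehension-style
-- filter instead of append-in-a-loop — objective: alternative.

-- ===== PORT A =====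
def keywordsA : List String :=
  ["Sports", "VOD / Buy / Rent", "YouTube", "Fox Soccer Plus",
   "ESPN", "Gold Channel", "Baseball", "Cup", "Football", "Championship",
   "WWE", "NFL", "Tennis", "Formula 1", "NBA", "Apple TV+", "Soccer",
   "Boxing", "UFC", "MMA", "Golf", "Hockey", "Cricket", "Rugby"]

def filter_excluded_content_py (items : List (List (String × String))) : List (List (String × String)) :=
  items.foldl (fun filtered item =>
    let d := PySem.Dict.mk item
    let content_text := d.getD "name" "" ++ " " ++ d.getD "type" "" ++ " " ++ d.getD "channel" ""
    if !(keywordsA.any fun keyword =>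
          PySem.Str.isIn (PySem.Str.lower keyword) (PySem.Str.lower content_text))
    then filtered ++ [item] else filtered) []

-- ===== PORT B =====
def kwLowerB : List String :=
  ["sports", "vod / buy / rent", "youtube", "fox soccer plus",
   "espn", "gold channel", "baseball", "cup", "football", "championship",
   "wwe", "nfl", "tennis", "formula 1", "nba", "apple tv+", "soccer",
   "boxing", "ufc", "mma", "golf", "hockey", "cricket", "rugby"]

-- _BUCKETS: setdefault(kw[0], []).append(kw) is Dict.modify kw[0] [] (· ++ [kw]);
-- every keyword is a nonempty literal, so kw[0] is headD (exact here, no IndexError).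
def bucketsB : PySem.Dict Char (List String) :=
  kwLowerB.foldl (fun d kw => d.modify (kw.toList.headD ' ') [] (· ++ [kw])) PySem.Dict.empty

-- the 'for i in range(len(t)): for kw in _BUCKETS.get(t[i], ()): if t.startswith(kw, i)'
-- loop of _has_excluded, as structural recursion over the suffixes of t
-- (t.startswith(kw, i) inspects exactly the suffix of t at i, so the suffix view is exact).
def scanB : List Char → Bool
  | [] => false
  | c :: rest =>
    ((bucketsB.getD c []).any fun kw => PySem.Chars.startswith (c :: rest) kw.toList) || scanB rest

def hasExcludedB (text : String) : Bool := scanB (PySem.Str.lower text).toList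

def filter_excluded_content_py_alt (items : List (List (String × String))) : List (List (String × String)) :=
  items.filter (fun item =>
    let d := PySem.Dict.mk item
    !hasExcludedB (d.getD "name" "" ++ " " ++ d.getD "type" "" ++ " " ++ d.getD "channel" ""))

-- ===== PRECONDITION & SPEC =====
def Spec_filter_excluded_content_py (items : List (List (String × String))) (out : List (List (String × String))) : Prop := out = filter_excluded_content_py_alt items
instance (items : List (List (String × String))) (out : List (List (String × String))) : Decidable (Spec_filter_excluded_content_py items out) := by unfold Spec_filter_excluded_content_py; infer_instance

-- ===== CLAIM (what is proved, stated in full; the proofs are below) =====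
def Claim_equal_filter_excluded_content_py : Prop := ∀ (items : List (List (String × String))), Dom_filter_excluded_content_py items → Spec_filter_excluded_content_py items (filter_excluded_content_py items)

-- ===== LEMMAS AND PROOFS =====

-- B's bucket construction, seen as a fold over (first char, keyword) pairs.
def pairsB : List (Char × String) := kwLowerB.map (fun kw => (kw.toList.headD ' ', kw))

theorem bucketsB_getD (c : Char) :
    bucketsB.getD c [] = (pairsB.filter (fun p => p.1 == c)).map (·.2) := by
  have h : bucketsB = pairsB.foldl (fun d p => d.modify p.1 [] (· ++ [p.2])) PySem.Dict.empty := by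
    simp only [pairsB, List.foldl_map]; rfl
  rw [h, PySem.Dict.getD_foldl_modify_append, PySem.Dict.getD_empty, List.nil_append]

theorem kw_nonempty : ∀ kw ∈ kwLowerB, kw.toList ≠ [] := by decide

theorem mem_bucket (c : Char) (kw : String) :
    kw ∈ bucketsB.getD c [] ↔ kw ∈ kwLowerB ∧ kw.toList.headD ' ' = c := by
  rw [bucketsB_getD]
  simp only [pairsB, List.mem_map, List.mem_filter]
  constructor
  · rintro ⟨p, ⟨⟨k, hk, rfl⟩, hc⟩, rfl⟩
    exact ⟨hk, by simpa using hc⟩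
  · rintro ⟨hk, hc⟩
    exact ⟨(kw.toList.headD ' ', kw), ⟨⟨kw, hk, rfl⟩, by simpa using hc⟩, rfl⟩

theorem scanB_iff (t : List Char) :
    scanB t = true ↔ ∃ kw ∈ kwLowerB, ∃ j, kw.toList <+: t.drop j := by
  induction t with
  | nil =>
    simp only [scanB, Bool.false_eq_true, false_iff]
    rintro ⟨kw, hkw, j, h⟩
    exact kw_nonempty kw hkw (List.prefix_nil.mp (by simpa using h))
  | cons c rest ih =>
    simp only [scanB, Bool.or_eq_true, List.any_eq_true, ih]
    constructor
    · rintro (⟨kw, hkw, hsw⟩ | ⟨kw, hkw, j, h⟩)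
      · exact ⟨kw, (mem_bucket c kw).mp hkw |>.1, 0, (PySem.Chars.startswith_iff _ _).mp hsw⟩
      · exact ⟨kw, hkw, j + 1, by simpa using h⟩
    · rintro ⟨kw, hkw, j, h⟩
      cases j with
      | zero =>
        left
        refine ⟨kw, (mem_bucket c kw).mpr ⟨hkw, ?_⟩, (PySem.Chars.startswith_iff _ _).mpr (by simpa using h)⟩
        obtain ⟨x, l', hx⟩ : ∃ x l', kw.toList = x :: l' := by
          cases hkl : kw.toList with
          | nil => exact absurd hkl (kw_nonempty kw hkw)
          | cons a b => exact ⟨a, b, rfl⟩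
        have : x = c := by
          have := h; rw [hx] at this
          simpa using (List.cons_prefix_cons.mp (by simpa using this)).1
        simp [hx, this]
      | succ j' => exact Or.inr ⟨kw, hkw, j', by simpa using h⟩

theorem scanB_eq_any (t : List Char) :
    scanB t = kwLowerB.any (fun kw => PySem.Chars.isIn kw.toList t) := by
  rcases Bool.eq_false_or_eq_true (scanB t) with h | h <;> rw [h] <;> symm
  · rw [List.any_eq_true]
    obtain ⟨kw, hkw, j, hj⟩ := (scanB_iff t).mp h
    exact ⟨kw, hkw, (PySem.Chars.exists_prefix_drop_iff_isIn kw.toList t).mp ⟨j, hj⟩⟩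
  · rw [List.any_eq_false]
    intro kw hkw hIn
    obtain ⟨j, hj⟩ := (PySem.Chars.exists_prefix_drop_iff_isIn kw.toList t).mpr hIn
    have : scanB t = true := (scanB_iff t).mpr ⟨kw, hkw, j, hj⟩
    simp [this] at h

theorem lowered_keywords :
    keywordsA.map (fun kw => (PySem.Str.lower kw).toList) = kwLowerB.map String.toList := by decide

theorem pred_eq (text : String) :
    (keywordsA.any fun keyword =>
        PySem.Str.isIn (PySem.Str.lower keyword) (PySem.Str.lower text))
      = hasExcludedB text := by
  rw [hasExcludedB, scanB_eq_any]
  have h1 : (keywordsA.any fun keyword =>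
      PySem.Str.isIn (PySem.Str.lower keyword) (PySem.Str.lower text))
      = (keywordsA.map (fun kw => (PySem.Str.lower kw).toList)).any
          (fun l => PySem.Chars.isIn l (PySem.Str.lower text).toList) := by
    rw [List.any_map]
    simp only [PySem.Str.isIn_eq, PySem.Str.toList_lower]
    rfl
  rw [h1, lowered_keywords, List.any_map]
  rfl

-- ===== VERDICT (by name: the statement is the Claim_ definition above) =====
theorem filter_excluded_content_py_spec : Claim_equal_filter_excluded_content_py := by
  intro items _
  unfold Spec_filter_excluded_content_py
  unfold filter_excluded_content_py filter_excluded_content_py_alt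
  rw [PySem.List.foldl_append_if_eq_filter]
  simp only [List.nil_append, pred_eq, hasExcludedB]
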